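-- pv_equiv track=rewrite | github.com/matthewwoodc0/lerobot-gui-wrapper | robot_pipeline_app/probes.py | summarize_probe_error
-- ===== SOURCE A (Python) =====
-- def summarize_probe_error(raw_message: str) -> str:
--     lines = [line.strip() for line in raw_message.splitlines() if line.strip()]
--     if not lines:
--         return "unknown error"
--     priority_markers = (
--         "access has been denied",
--         "permission denied",
--         "timed out",
--         "camera not opened",
--         "no frame",
--         "failed to properly initialize",
--     )
--     lowered_lines = [line.lower() for line in lines]
--     for marker in priority_markers:
--         for idx, lowered in enumerate(lowered_lines):
--             if marker in lowered:
--                 return lines[idx]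
--     return lines[-1]
-- ===== SOURCE B (Python) =====
-- def summarize_probe_error(raw_message: str) -> str:
--     priority_markers = (
--         "access has been denied",
--         "permission denied",
--         "timed out",
--         "camera not opened",
--         "no frame",
--         "failed to properly initialize",
--     )
--     M = len(priority_markers)
--     best_rank = M
--     best_line = None
--     last_line = None
--     for raw_line in raw_message.splitlines():
--         line = raw_line.strip()
--         if not line:
--             continue
--         last_line = line
--         lowered = line.lower()
--         rank = M
--         for i, marker in enumerate(priority_markers):
--             if marker in lowered:
--                 rank = i
--                 break
--         if rank < best_rank:
--             best_rank = rank
--             best_line = line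
--     if last_line is None:
--         return "unknown error"
--     return best_line if best_line is not None else last_line
-- ===== Notes on version B (the rewrite author's own statement) =====
-- stated objective: alternative
-- what changed: Replaced the marker-major double scan (for each marker, rescan all lowered lines and early-return) with a single line-major pass that computes each stripped line's priority rank and keeps the running best with a strict-< update, folding the strip/filter and the last-line fallback into the same loop.
import Mathlib
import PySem

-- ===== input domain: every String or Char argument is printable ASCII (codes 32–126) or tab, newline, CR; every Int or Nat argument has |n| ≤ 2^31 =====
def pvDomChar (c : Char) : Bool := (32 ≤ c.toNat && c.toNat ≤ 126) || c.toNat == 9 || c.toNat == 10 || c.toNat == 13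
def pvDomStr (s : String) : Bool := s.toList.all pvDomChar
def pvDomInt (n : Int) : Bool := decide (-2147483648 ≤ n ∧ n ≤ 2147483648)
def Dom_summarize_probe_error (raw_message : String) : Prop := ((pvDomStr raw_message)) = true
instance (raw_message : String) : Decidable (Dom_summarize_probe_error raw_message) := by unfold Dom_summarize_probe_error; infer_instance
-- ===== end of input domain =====

-- B replaces A's marker-major early-return double scan by a single line-major pass
-- keeping a running (best rank, best line); same cost, different decomposition (objective: alternative).

def pvMarkers : List String :=
  ["access has been denied", "permission denied", "timed out",
   "camera not opened", "no frame", "failed to properly initialize"]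

-- ===== PORT A =====
-- inner loop: 'for idx, lowered in enumerate(lowered_lines): if marker in lowered: return lines[idx]'
-- (lines walked in step with lowered_lines as a zip)
def pvAInner (marker : String) : List (String × String) → Option String
  | [] => none
  | (line, low) :: rest =>
      if PySem.Str.isIn marker low then some line else pvAInner marker rest

-- outer loop over priority_markers
def pvAFind (pairs : List (String × String)) : List String → Option String
  | [] => none
  | m :: rest =>
      match pvAInner m pairs with
      | some l => some l
      | none => pvAFind pairs rest

def summarize_probe_error (raw_message : String) : String :=
  let lines := ((PySem.Str.splitlines raw_message).map PySem.Str.strip).filter (fun s => !(s == ""))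
  if lines.isEmpty then "unknown error"
  else
    let lowered := lines.map PySem.Str.lower
    match pvAFind (lines.zip lowered) pvMarkers with
    | some l => l
    | none => PySem.List.pyGetD lines (-1) ""

-- ===== PORT B =====
-- 'rank = M; for i, marker in enumerate(priority_markers): if marker in lowered: rank = i; break'
def pvRankAux (low : String) : List String → Nat → Nat → Nat
  | [], _, M => M
  | m :: rest, i, M => if PySem.Str.isIn m low then i else pvRankAux low rest (i + 1) M

-- the single pass: state = (best_rank, best_line, last_line)
def pvBLoop : List String → Nat → Option String → Option String → Option String × Option String
  | [], _, best, last => (best, last)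
  | l :: rest, bestRank, best, last =>
      let s := PySem.Str.strip l
      if s == "" then pvBLoop rest bestRank best last
      else
        let low := PySem.Str.lower s
        let rank := pvRankAux low pvMarkers 0 pvMarkers.length
        if rank < bestRank then pvBLoop rest rank (some s) (some s)
        else pvBLoop rest bestRank best (some s)

def summarize_probe_error_alt (raw_message : String) : String :=
  match pvBLoop (PySem.Str.splitlines raw_message) pvMarkers.length none none with
  | (_, none) => "unknown error"
  | (best, some last) =>
      match best with
      | some b => b
      | none => last

-- ===== PRECONDITION & SPEC =====
def Spec_summarize_probe_error (raw_message : String) (out : String) : Prop := out = summarize_probe_error_alt raw_message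
instance (raw_message : String) (out : String) : Decidable (Spec_summarize_probe_error raw_message out) := by unfold Spec_summarize_probe_error; infer_instance

-- ===== CLAIM (what is proved, stated in full; the proofs are below) =====
def Claim_equal_summarize_probe_error : Prop := ∀ (raw_message : String), Dom_summarize_probe_error raw_message → Spec_summarize_probe_error raw_message (summarize_probe_error raw_message)

-- ===== LEMMAS AND PROOFS =====

-- clean rank of a lowered line w.r.t. a marker list: index of first contained marker, else length
def pvRk : List String → String → Nat
  | [], _ => 0
  | m :: rest, low => if PySem.Str.isIn m low then 0 else pvRk rest low + 1

def pvG (ms : List String) (l : String) : Nat := pvRk ms (PySem.Str.lower l)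

-- generalized line-major loop over already-stripped nonempty lines, rank function abstracted
def pvLoopG (g : String → Nat) : List String → Nat → Option String → Option String → Option String × Option String
  | [], _, best, last => (best, last)
  | l :: rest, r, best, _last =>
      if g l < r then pvLoopG g rest (g l) (some l) (some l)
      else pvLoopG g rest r best (some l)

-- A's double scan, expressed over the line list directly
def pvAF : List String → List String → Option String
  | [], _ => none
  | m :: rest, ls =>
      match ls.find? (fun l => PySem.Str.isIn m (PySem.Str.lower l)) with
      | some l => some l
      | none => pvAF rest ls

theorem pvRk_le (ms : List String) (low : String) : pvRk ms low ≤ ms.length := by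
  induction ms with
  | nil => simp [pvRk]
  | cons m rest ih => simp only [pvRk, List.length_cons]; split <;> omega

theorem pvRankAux_eq (ms : List String) (low : String) : ∀ (i M : Nat),
    pvRankAux low ms i M = if pvRk ms low < ms.length then i + pvRk ms low else M := by
  induction ms with
  | nil => intro i M; simp [pvRankAux, pvRk]
  | cons m rest ih =>
      intro i M
      simp only [pvRankAux, pvRk, List.length_cons]
      by_cases h : PySem.Chars.isIn m.toList low.toList = true
      · simp [h]
      · simp only [ih (i + 1) M]
        have := pvRk_le rest low
        split_ifs <;> omega

theorem pvRankAux_full (ms : List String) (low : String) :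
    pvRankAux low ms 0 ms.length = pvRk ms low := by
  rw [pvRankAux_eq]
  have := pvRk_le ms low
  split_ifs with h <;> omega

theorem pvBLoop_eq_loopG (raws : List String) : ∀ (r : Nat) (b la : Option String),
    pvBLoop raws r b la
      = pvLoopG (pvG pvMarkers) ((raws.map PySem.Str.strip).filter (fun s => !(s == ""))) r b la := by
  induction raws with
  | nil => intro r b la; simp [pvBLoop, pvLoopG]
  | cons l rest ih =>
      intro r b la
      simp only [pvBLoop, List.map_cons, List.filter_cons]
      by_cases h : PySem.Str.strip l == ""
      · simp [h, ih]
      · rw [pvRankAux_full]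
        simp [h, pvLoopG, ih, pvG]

theorem pvLoopG_snd (g : String → Nat) (ls : List String) : ∀ (r : Nat) (b la : Option String),
    (pvLoopG g ls r b la).2 = ls.getLast?.or la := by
  induction ls with
  | nil => intro r b la; simp [pvLoopG]
  | cons l rest ih =>
      intro r b la
      simp only [pvLoopG]
      have hgl : ∀ (la' : Option String), rest.getLast?.or (some l) = (l :: rest).getLast?.or la' := by
        intro la'
        cases hr : rest.getLast? with
        | none =>
            have h0 : rest = [] := List.getLast?_eq_none_iff.mp hr
            simp [h0]
        | some x =>
            simp [List.getLast?_cons, hr]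
      split <;> rw [ih, hgl]

theorem pvLoopG_zero (g : String → Nat) (ls : List String) : ∀ (b la : Option String),
    (pvLoopG g ls 0 b la).1 = b := by
  induction ls with
  | nil => intro b la; simp [pvLoopG]
  | cons l rest ih => intro b la; simp [pvLoopG, ih]

theorem pvLoopG_find_zero (g : String → Nat) (ls : List String) :
    ∀ (r : Nat) (b la : Option String) (l₀ : String),
    ls.find? (fun l => g l == 0) = some l₀ → 1 ≤ r →
    (pvLoopG g ls r b la).1 = some l₀ := by
  induction ls with
  | nil => intro r b la l₀ hf; simp at hf
  | cons l rest ih =>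
      intro r b la l₀ hf hr
      simp only [List.find?_cons] at hf
      by_cases h0 : g l = 0
      · have hb : (g l == 0) = true := by simpa using h0
        rw [hb] at hf
        have hl : l = l₀ := by simpa using hf
        subst hl
        simp only [pvLoopG, h0]
        have : (0 : Nat) < r := hr
        simp only [this, if_true]
        exact pvLoopG_zero g rest (some l) (some l)
      · have hb : (g l == 0) = false := by simpa using h0
        rw [hb] at hf
        have hf' : rest.find? (fun l => g l == 0) = some l₀ := hf
        simp only [pvLoopG]
        split
        · exact ih (g l) (some l) (some l) l₀ hf' (by omega)
        · exact ih r b (some l) l₀ hf' hr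

theorem pvLoopG_shift (g g' : String → Nat) (ls : List String)
    (hgg : ∀ l ∈ ls, g l = g' l + 1) : ∀ (r : Nat) (b la : Option String),
    pvLoopG g ls (r + 1) b la = pvLoopG g' ls r b la := by
  induction ls with
  | nil => intro r b la; simp [pvLoopG]
  | cons l rest ih =>
      intro r b la
      have hl : g l = g' l + 1 := hgg l (List.mem_cons_self ..)
      have hrest : ∀ l ∈ rest, g l = g' l + 1 := fun x hx => hgg x (List.mem_cons_of_mem _ hx)
      simp only [pvLoopG, hl]
      by_cases h : g' l < r
      · simp only [if_pos (by omega : g' l + 1 < r + 1), if_pos h]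
        exact ih hrest (g' l) (some l) (some l)
      · rw [if_neg (by omega : ¬ g' l + 1 < r + 1), if_neg h]
        exact ih hrest r b (some l)

-- find? only depends on predicate values on the list
theorem pvFind?_congr {α : Type} (p q : α → Bool) : ∀ (ls : List α),
    (∀ x ∈ ls, p x = q x) → ls.find? p = ls.find? q := by
  intro ls
  induction ls with
  | nil => intro _; rfl
  | cons x rest ih =>
      intro h
      have hx := h x (List.mem_cons_self ..)
      simp only [List.find?_cons, hx]
      cases q x
      · exact ih fun y hy => h y (List.mem_cons_of_mem _ hy)
      · rfl

-- the heart: line-major best scan = marker-major first-match scan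
theorem pvLoopG_eq_pvAF (ms : List String) : ∀ (ls : List String) (b la : Option String),
    (pvLoopG (pvG ms) ls ms.length b la).1 = (pvAF ms ls).or b := by
  induction ms with
  | nil =>
      intro ls b la
      have h0 : pvG ([] : List String) = fun _ => 0 := by funext l; simp [pvG, pvRk]
      simp [pvAF, h0, pvLoopG_zero]
  | cons m rest ih =>
      intro ls b la
      cases hf : ls.find? (fun l => PySem.Str.isIn m (PySem.Str.lower l)) with
      | some l₀ =>
          have hf' : ls.find? (fun l => pvG (m :: rest) l == 0) = some l₀ := by
            rw [← hf]
            apply pvFind?_congr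
            intro l _
            simp only [pvG, pvRk]
            by_cases h : PySem.Chars.isIn m.toList (PySem.Chars.lower l.toList) = true <;> simp [h]
          rw [pvLoopG_find_zero (pvG (m :: rest)) ls (m :: rest).length b la l₀ hf' (by simp)]
          have hfC : List.find? (fun l => PySem.Chars.isIn m.toList (PySem.Chars.lower l.toList)) ls
              = some l₀ := by simpa using hf
          simp [pvAF, hfC]
      | none =>
          have hnone : ∀ l ∈ ls, PySem.Chars.isIn m.toList (PySem.Chars.lower l.toList) = false := by
            intro l hl
            have := List.find?_eq_none.mp hf l hl
            simpa using this
          have hshift : ∀ l ∈ ls, pvG (m :: rest) l = pvG rest l + 1 := by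
            intro l hl
            simp [pvG, pvRk, hnone l hl]
          have hsw : pvLoopG (pvG (m :: rest)) ls (rest.length + 1) b la
              = pvLoopG (pvG rest) ls rest.length b la :=
            pvLoopG_shift _ _ ls hshift rest.length b la
          simp only [List.length_cons, hsw, ih ls b la, pvAF, hf]

-- A's zipped inner scan is a find? over the lines
theorem pvAInner_eq (m : String) (ls : List String) :
    pvAInner m (ls.zip (ls.map PySem.Str.lower))
      = ls.find? (fun l => PySem.Str.isIn m (PySem.Str.lower l)) := by
  induction ls with
  | nil => simp [pvAInner]
  | cons l rest ih =>
      simp only [List.map_cons, List.zip_cons_cons, pvAInner, List.find?_cons]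
      cases hc : PySem.Chars.isIn m.toList (PySem.Chars.lower l.toList) <;> simp [hc, ih]

theorem pvAFind_eq (ms : List String) (ls : List String) :
    pvAFind (ls.zip (ls.map PySem.Str.lower)) ms = pvAF ms ls := by
  induction ms with
  | nil => simp [pvAFind, pvAF]
  | cons m rest ih => simp only [pvAFind, pvAF, pvAInner_eq, ih]

-- both result expressions, over an arbitrary cleaned line list
theorem pvMain (ls : List String) :
    (if ls.isEmpty then "unknown error"
     else
       match pvAFind (ls.zip (ls.map PySem.Str.lower)) pvMarkers with
       | some l => l
       | none => PySem.List.pyGetD ls (-1) "") =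
    (match pvLoopG (pvG pvMarkers) ls pvMarkers.length none none with
     | (_, none) => "unknown error"
     | (best, some last) =>
         match best with
         | some b => b
         | none => last) := by
  by_cases hemp : ls = []
  · subst hemp
    simp [pvLoopG]
  · obtain ⟨x, hx⟩ : ∃ x, ls.getLast? = some x := by
      cases h : ls.getLast? with
      | none => exact absurd (List.getLast?_eq_none_iff.mp h) hemp
      | some y => exact ⟨y, rfl⟩
    have hsnd := pvLoopG_snd (pvG pvMarkers) ls pvMarkers.length none none
    rw [hx, Option.some_or] at hsnd
    have hfst := pvLoopG_eq_pvAF pvMarkers ls none none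
    rw [Option.or_none] at hfst
    have hee : ls.isEmpty = false := by simp [hemp]
    rw [hee, if_neg (by simp), pvAFind_eq]
    cases hp : pvLoopG (pvG pvMarkers) ls pvMarkers.length none none with
    | mk best last =>
        rw [hp] at hsnd hfst
        simp only at hsnd hfst
        subst hsnd
        subst hfst
        cases hb : pvAF pvMarkers ls with
        | some l => simp
        | none =>
            have hgl : ls.getLast? = some (ls.getLast hemp) :=
              List.getLast?_eq_getLast_of_ne_nil hemp
            rw [hgl] at hx
            injection hx with hx'
            simp only
            rw [PySem.List.pyGetD_neg_one ls "" hemp, hx']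

-- ===== VERDICT (by name: the statement is the Claim_ definition above) =====
theorem summarize_probe_error_spec : Claim_equal_summarize_probe_error := by
  intro raw _
  unfold Spec_summarize_probe_error summarize_probe_error summarize_probe_error_alt
  rw [pvBLoop_eq_loopG]
  exact pvMain _
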